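-- pv_equiv track=rewrite | github.com/luckP/audio-creator | app/processors/text_cleaner.py | _reflow_text
-- ===== SOURCE A (Python) =====
-- from typing import List
--
-- def _reflow_text(lines: List[str]) -> str:
--     """
--     Intelligent text reflow.
--     Joins lines that seem to be part of the same paragraph.
--     Keeps double newlines as paragraph breaks.
--     """
--     result = []
--     current_paragraph = []
--
--     for line in lines:
--         stripped = line.strip()
--
--         if not stripped:
--             # Empty line -> Paragraph break
--             if current_paragraph:
--                 result.append(" ".join(current_paragraph))
--                 current_paragraph = []
--             continue
--
--         # Heuristic: If line ends with sentence punctuation, it might be the end of a thought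
--         # but usually in PDFs, paragraphs are visuals.
--         # We'll assume any consecutive non-empty lines are part of the same paragraph
--         # unless we detect a list item or header (TODO).
--         current_paragraph.append(stripped)
--
--     # Flush last paragraph
--     if current_paragraph:
--         result.append(" ".join(current_paragraph))
--
--     return "\n\n".join(result)
-- ===== SOURCE B (Python) =====
-- from typing import List
--
-- def _reflow_text(lines: List[str]) -> str:
--     """Reflow by recursively splitting the stripped lines into blank-separated runs."""
--     def paras(strs):
--         i = 0
--         while i < len(strs) and not strs[i]:
--             i += 1
--         if i == len(strs):
--             return []
--         j = i
--         while j < len(strs) and strs[j]: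
--             j += 1
--         return [" ".join(strs[i:j])] + paras(strs[j:])
--     return "\n\n".join(paras([l.strip() for l in lines]))
-- ===== Notes on version B (the rewrite author's own statement) =====
-- stated objective: alternative
-- what changed: Replaces A's single accumulator loop with explicit end-of-loop flush by a recursive decomposition that strips all lines once, then recursively splits them into blank-separated runs (skip blanks / take run / recurse) and joins the runs.
import Mathlib
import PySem

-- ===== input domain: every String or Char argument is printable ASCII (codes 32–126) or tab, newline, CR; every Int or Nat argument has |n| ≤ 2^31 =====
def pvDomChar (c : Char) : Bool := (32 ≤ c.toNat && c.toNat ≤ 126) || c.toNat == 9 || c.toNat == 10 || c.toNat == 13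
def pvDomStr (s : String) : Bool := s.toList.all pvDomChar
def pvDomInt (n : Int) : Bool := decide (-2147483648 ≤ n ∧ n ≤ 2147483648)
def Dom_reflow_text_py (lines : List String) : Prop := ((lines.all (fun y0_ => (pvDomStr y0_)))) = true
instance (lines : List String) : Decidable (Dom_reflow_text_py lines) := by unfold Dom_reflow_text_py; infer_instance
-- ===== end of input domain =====

-- B replaces A's accumulator loop with a recursive split of the stripped lines into
-- blank-separated runs (objective: alternative decomposition, same O(n) cost).

-- ===== PORT A =====
-- one loop step of A: state = (result, current_paragraph)
def pvStepA (st : List String × List String) (line : String) : List String × List String :=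
  let stripped := PySem.Str.strip line
  if stripped = "" then
    if st.2 ≠ [] then (st.1 ++ [PySem.Str.join " " st.2], []) else st
  else
    (st.1, st.2 ++ [stripped])

def reflow_text_py (lines : List String) : String :=
  let st := lines.foldl pvStepA ([], [])
  let result := if st.2 ≠ [] then st.1 ++ [PySem.Str.join " " st.2] else st.1
  PySem.Str.join "\n\n" result

-- ===== PORT B =====
-- B's `paras`: skip leading blanks (the first while loop), take the nonblank run
-- (the second while loop), join it, recurse on the rest.
def pvParasB : List String → List String
  | [] => []
  | s :: rest =>
      if s = "" then pvParasB rest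
      else (PySem.Str.join " " (s :: rest.takeWhile (fun t => decide (t ≠ ""))))
             :: pvParasB (rest.dropWhile (fun t => decide (t ≠ "")))
  termination_by ls => ls.length
  decreasing_by
    · simp
    · simpa using Nat.lt_succ_of_le (List.length_dropWhile_le _ _)

def reflow_text_py_alt (lines : List String) : String :=
  PySem.Str.join "\n\n" (pvParasB (lines.map PySem.Str.strip))

-- ===== PRECONDITION & SPEC =====
def Spec_reflow_text_py (lines : List String) (out : String) : Prop := out = reflow_text_py_alt lines
instance (lines : List String) (out : String) : Decidable (Spec_reflow_text_py lines out) := by unfold Spec_reflow_text_py; infer_instance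

-- ===== CLAIM (what is proved, stated in full; the proofs are below) =====
def Claim_equal_reflow_text_py : Prop := ∀ (lines : List String), Dom_reflow_text_py lines → Spec_reflow_text_py lines (reflow_text_py lines)

-- ===== LEMMAS AND PROOFS =====

-- paragraphs of the (already stripped) list `ls` with a pending paragraph `cur`
def pvParas' (cur : List String) : List String → List String
  | [] => if cur ≠ [] then [PySem.Str.join " " cur] else []
  | s :: ls =>
      if s = "" then
        if cur ≠ [] then PySem.Str.join " " cur :: pvParas' [] ls else pvParas' [] ls
      else pvParas' (cur ++ [s]) ls

theorem pvParas'_eq (ls : List String) : ∀ (cur : List String),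
    pvParas' cur ls =
      if cur = [] then pvParasB ls
      else (PySem.Str.join " " (cur ++ ls.takeWhile (fun t => decide (t ≠ ""))))
             :: pvParasB (ls.dropWhile (fun t => decide (t ≠ ""))) := by
  induction ls with
  | nil =>
      intro cur
      by_cases h : cur = [] <;> simp [pvParas', pvParasB, h]
  | cons s ls ih =>
      intro cur
      by_cases hs : s = ""
      · subst hs
        by_cases h : cur = [] <;>
          simp [pvParas', pvParasB, h, ih]
      · have hne : cur ++ [s] ≠ [] := by simp
        by_cases h : cur = []
        · subst h
          simp [pvParas', pvParasB, hs, ih]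
        · simp [pvParas', hs, h, ih, List.append_assoc]

theorem pvFoldA_eq (ls : List String) : ∀ (res cur : List String),
    (let st := ls.foldl pvStepA (res, cur)
     if st.2 ≠ [] then st.1 ++ [PySem.Str.join " " st.2] else st.1)
      = res ++ pvParas' cur (ls.map PySem.Str.strip) := by
  induction ls with
  | nil =>
      intro res cur
      by_cases h : cur = [] <;> simp [pvParas', h]
  | cons l ls ih =>
      intro res cur
      by_cases hs : PySem.Str.strip l = ""
      · by_cases h : cur = []
        · simp [pvStepA, pvParas', hs, h, ih]
        · simp [pvStepA, pvParas', hs, h, ih, List.append_assoc]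
      · simp [pvStepA, pvParas', hs, ih]

-- ===== VERDICT (by name: the statement is the Claim_ definition above) =====
theorem reflow_text_py_spec : Claim_equal_reflow_text_py := by
  intro lines _
  show reflow_text_py lines = reflow_text_py_alt lines
  unfold reflow_text_py reflow_text_py_alt
  show PySem.Str.join "\n\n" _ = _
  rw [pvFoldA_eq lines [] []]
  simp [pvParas'_eq]
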